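-- pv_equiv track=rewrite | github.com/asweigart/programmedpatterns | book/visualpatterns.py | formula29
-- ===== SOURCE A (Python) =====
-- def formula29(step):
--     count = 1
--     i = 2
--     while True:
--         if i > step:
--             break
--         count += 1
--         i += 1
--
--         if i > step:
--             break
--         count += 0
--         i += 1
--
--         if i > step:
--             break
--         count += 2
--         i += 1
--
--         if i > step:
--             break
--         count += 0
--         i += 1
--     return count
-- ===== SOURCE B (Python) =====
-- def formula29(step):
--     n = step - 1
--     if n < 0:
--         n = 0
--     q, r = divmod(n, 4)
--     return 1 + 3 * q + (0, 1, 1, 3)[r]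
-- ===== Notes on version B (the rewrite author's own statement) =====
-- stated objective: faster
-- what changed: Replaced the O(step) unrolled while-loop accumulating the period-4 pattern (1,0,2,0) by a closed-form O(1) computation using divmod(step-1, 4) and a prefix-sum table.
import Mathlib
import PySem

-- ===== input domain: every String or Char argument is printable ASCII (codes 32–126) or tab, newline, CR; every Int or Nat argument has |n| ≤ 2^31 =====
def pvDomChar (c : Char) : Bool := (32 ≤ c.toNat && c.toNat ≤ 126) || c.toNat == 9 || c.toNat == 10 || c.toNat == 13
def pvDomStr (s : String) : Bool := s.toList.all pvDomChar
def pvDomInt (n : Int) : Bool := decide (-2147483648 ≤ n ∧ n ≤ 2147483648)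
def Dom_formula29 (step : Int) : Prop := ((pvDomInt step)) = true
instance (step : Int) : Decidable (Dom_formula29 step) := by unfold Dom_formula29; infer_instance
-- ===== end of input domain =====

-- B replaces A's O(step) unrolled while-loop by a closed-form O(1) divmod computation.

-- ===== PORT A =====
-- the while-True loop with its four sequential break checks; terminates because i grows by 4
def formula29Loop (step count i : Int) : Int :=
  if i > step then count
  else if i + 1 > step then count + 1
  else if i + 2 > step then count + 1
  else if i + 3 > step then count + 3
  else formula29Loop step (count + 3) (i + 4)
termination_by (step - i).toNat
decreasing_by omega

def formula29 (step : Int) : Int := formula29Loop step 1 2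

-- ===== PORT B =====
def formula29_alt (step : Int) : Int :=
  let n := step - 1
  let n := if n < 0 then 0 else n
  let q := PySem.Int.floordiv n 4
  let r := PySem.Int.mod n 4
  1 + 3 * q + (if r = 0 then 0 else if r = 1 then 1 else if r = 2 then 1 else 3)

-- ===== PRECONDITION & SPEC =====
def Spec_formula29 (step : Int) (out : Int) : Prop := out = formula29_alt step
instance (step : Int) (out : Int) : Decidable (Spec_formula29 step out) := by unfold Spec_formula29; infer_instance

-- ===== CLAIM (what is proved, stated in full; the proofs are below) =====
def Claim_equal_formula29 : Prop := ∀ (step : Int), Dom_formula29 step → Spec_formula29 step (formula29 step)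

-- ===== LEMMAS AND PROOFS =====

-- closed form of the remaining loop contribution as a function of the number of remaining steps
def pvF (m : Nat) : Int :=
  3 * (m / 4 : Nat) + (if m % 4 = 0 then 0 else if m % 4 = 1 then 1 else if m % 4 = 2 then 1 else 3)

theorem formula29Loop_eq (step count i : Int) :
    formula29Loop step count i = count + pvF (step - i + 1).toNat := by
  generalize hm : (step - i + 1).toNat = m
  induction m using Nat.strong_induction_on generalizing count i with
  | _ m ih =>
    rw [formula29Loop]
    split_ifs with h1 h2 h3 h4
    · have : m = 0 := by omega
      simp [this, pvF]
    · have : m = 1 := by omega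
      simp [this, pvF]
    · have : m = 2 := by omega
      simp [this, pvF]
    · have : m = 3 := by omega
      simp [this, pvF]
    · have hm4 : 4 ≤ m := by omega
      rw [ih (m - 4) (by omega) (count + 3) (i + 4) (by omega)]
      have hq : (m : Nat) / 4 = (m - 4) / 4 + 1 := by omega
      have hr : m % 4 = (m - 4) % 4 := by omega
      simp only [pvF, hq, hr]
      push_cast
      ring

theorem formula29_alt_eq (step : Int) : formula29_alt step = 1 + pvF (step - 1).toNat := by
  unfold formula29_alt pvF
  have h4 : (0 : Int) < 4 := by norm_num
  by_cases h : step - 1 < 0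
  · have h0 : (step - 1).toNat = 0 := by omega
    simp [h, h0, PySem.Int.floordiv, PySem.Int.mod]
  · have hn : step - 1 = ((step - 1).toNat : Int) := by omega
    simp only [if_neg h]
    rw [hn]
    rw [show ((4:Int)) = ((4:Nat):Int) by norm_cast]
    rw [PySem.Int.floordiv_natCast, PySem.Int.mod_natCast]
    generalize (step - 1).toNat = m
    have hlt : m % 4 = 0 ∨ m % 4 = 1 ∨ m % 4 = 2 ∨ m % 4 = 3 := by omega
    rcases hlt with h | h | h | h <;>
      simp [h] <;> omega

-- ===== VERDICT (by name: the statement is the Claim_ definition above) =====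
theorem formula29_spec : Claim_equal_formula29 := by
  intro step _
  show formula29 step = formula29_alt step
  rw [formula29, formula29Loop_eq, formula29_alt_eq]
  have : (step - 2 + 1).toNat = (step - 1).toNat := by omega
  rw [this]
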